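-- pv_equiv track=rewrite | github.com/Introduction-to-Programming-OSOWSKI/4-7-remove-evens-PorterOBrien2021 | main.py | removeEvens
-- ===== SOURCE A (Python) =====
-- def removeEvens(x):
--     total = x
--     numpopped = 0
--     for i in range(0, len(x)):
--         if total[i - numpopped] % 2 == 0 and total[i - numpopped] != 0:
--             total.pop(i - numpopped)
--             numpopped = numpopped + 1
--
--     return total
-- ===== SOURCE B (Python) =====
-- def removeEvens(x):
--     w = 0
--     for i in range(len(x)):
--         v = x[i]
--         if v % 2 != 0 or v == 0:
--             x[w] = v
--             w += 1
--     del x[w:]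
--     return x
-- ===== Notes on version B (the rewrite author's own statement) =====
-- stated objective: faster
-- what changed: A repeatedly pops even nonzero elements in place (each pop shifts the tail, with a numpopped offset); B does one pass with a write cursor, compacting kept elements forward into the same list and truncating once.
import Mathlib
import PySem

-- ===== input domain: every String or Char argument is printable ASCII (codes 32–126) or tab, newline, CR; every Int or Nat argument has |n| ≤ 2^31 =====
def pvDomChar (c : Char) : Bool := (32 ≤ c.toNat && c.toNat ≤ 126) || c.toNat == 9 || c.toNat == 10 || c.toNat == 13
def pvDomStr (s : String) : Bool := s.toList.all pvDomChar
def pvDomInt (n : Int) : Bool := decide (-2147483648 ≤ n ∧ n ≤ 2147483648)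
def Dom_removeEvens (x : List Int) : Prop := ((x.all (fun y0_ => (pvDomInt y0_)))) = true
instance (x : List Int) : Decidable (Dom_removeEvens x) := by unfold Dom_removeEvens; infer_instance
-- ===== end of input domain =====

-- B replaces A's quadratic pop-with-offset loop by a single O(n) pass with a write cursor,
-- compacting kept elements forward into the same list and truncating once (return-value
-- equivalence; both Pythons mutate the argument list in place).

-- ===== PORT A =====
-- loop body of A: pop total[i - numpopped] if even and nonzero
def pvStepA (st : List Int × Int) (i : Int) : List Int × Int :=
  if PySem.Int.mod (PySem.List.pyGetD st.1 (i - st.2) 0) 2 == 0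
     && PySem.List.pyGetD st.1 (i - st.2) 0 != 0 then
    match PySem.List.pop? st.1 (i - st.2) with
    | some r => (r.2, st.2 + 1)
    | none => (st.1, st.2)
  else st

def removeEvens (x : List Int) : List Int :=
  ((PySem.List.pyRange 0 (PySem.List.len x) 1).foldl pvStepA (x, 0)).1

-- ===== PORT B =====
-- loop body of B: read x[i]; if odd or zero, write it at the cursor and advance
def pvStepB (x : List Int) (st : List Int × Int) (i : Int) : List Int × Int :=
  let v := PySem.List.pyGetD x i 0
  if PySem.Int.mod v 2 != 0 || v == 0 then
    (PySem.List.pySetD st.1 st.2 v, st.2 + 1)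
  else st

def removeEvens_alt (x : List Int) : List Int :=
  let s := (PySem.List.pyRange 0 (PySem.List.len x) 1).foldl (pvStepB x) (x, 0)
  PySem.List.slice s.1 none (some s.2)

-- ===== PRECONDITION & SPEC =====
def Spec_removeEvens (x : List Int) (out : List Int) : Prop := out = removeEvens_alt x
instance (x : List Int) (out : List Int) : Decidable (Spec_removeEvens x out) := by unfold Spec_removeEvens; infer_instance

-- ===== CLAIM (what is proved, stated in full; the proofs are below) =====
def Claim_equal_removeEvens : Prop := ∀ (x : List Int), Dom_removeEvens x → Spec_removeEvens x (removeEvens x)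

-- ===== LEMMAS AND PROOFS =====

-- the elements both programs keep: odd or zero
def pvKeep (v : Int) : Bool := PySem.Int.mod v 2 != 0 || v == 0

lemma pvCond (v : Int) : (PySem.Int.mod v 2 == 0 && v != 0) = !pvKeep v := by
  simp [pvKeep, Bool.not_or, bne, Bool.not_not]

lemma pvGetD_append_cons (a : List Int) (b : Int) (c : List Int) (d : Int) :
    (a ++ b :: c).getD a.length d = b := by
  induction a with
  | nil => rfl
  | cons h t ih => simp

lemma pvEraseIdx_append (a : List Int) (b : Int) (c : List Int) :
    (a ++ b :: c).eraseIdx a.length = a ++ c := by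
  induction a with
  | nil => rfl
  | cons h t ih => simp [ih]

lemma pvSet_append (a : List Int) (b : Int) (c : List Int) (v : Int) :
    (a ++ b :: c).set a.length v = a ++ v :: c := by
  induction a with
  | nil => rfl
  | cons h t ih => simp [ih]

-- A's loop invariant: processed prefix already filtered, numpopped = i - kept-so-far
lemma pvA_loop (rest : List Int) : ∀ (kept : List Int) (i : Nat),
    (PySem.List.pyRange (i : Int) ((i : Int) + rest.length) 1).foldl pvStepA
      (kept ++ rest, (i : Int) - kept.length)
    = (kept ++ rest.filter pvKeep,
       ((i : Int) + rest.length) - (kept ++ rest.filter pvKeep).length) := by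
  induction rest with
  | nil =>
    intro kept i
    rw [PySem.List.pyRange_one_eq_nil (by simp)]
    simp
  | cons v rs ih =>
    intro kept i
    rw [PySem.List.pyRange_one_cons (by push_cast [List.length_cons]; omega), List.foldl_cons]
    have hidx : (i : Int) - ((i : Int) - (kept.length : Int)) = (kept.length : Int) := by ring
    have hget : PySem.List.pyGetD (kept ++ v :: rs) (kept.length : Int) 0 = v := by
      rw [PySem.List.pyGetD_natCast, pvGetD_append_cons]
    by_cases hk : pvKeep v
    · -- kept: state unchanged, fold on with kept ++ [v]
      have hstep : pvStepA (kept ++ v :: rs, (i : Int) - kept.length) (i : Int)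
          = (kept ++ v :: rs, (i : Int) - kept.length) := by
        unfold pvStepA
        simp only [hidx, hget, pvCond, hk, Bool.not_true, Bool.false_eq_true, if_false]
      rw [hstep]
      have := ih (kept ++ [v]) (i + 1)
      simp only [List.append_assoc, List.cons_append, List.nil_append, List.length_append,
        List.length_cons, List.length_nil, List.filter_cons_of_pos hk] at this ⊢
      push_cast at this ⊢
      convert this using 2 <;> try ring_nf
    · -- popped: tail shifts left, numpopped grows
      have hstep : pvStepA (kept ++ v :: rs, (i : Int) - kept.length) (i : Int)
          = (kept ++ rs, ((i : Int) - kept.length) + 1) := by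
        unfold pvStepA
        simp only [hidx, hget, pvCond, hk, Bool.not_false, if_true]
        rw [PySem.List.pop?_natCast (kept ++ v :: rs) kept.length (by simp), pvEraseIdx_append]
      rw [hstep]
      have := ih kept (i + 1)
      simp only [List.length_cons, List.filter_cons_of_neg (by simpa using hk)] at this ⊢
      push_cast at this ⊢
      convert this using 2 <;> try ring_nf

lemma pvA_eq_filter (x : List Int) : removeEvens x = x.filter pvKeep := by
  unfold removeEvens
  have := pvA_loop x [] 0
  simp only [List.nil_append, List.length_nil, Nat.cast_zero, Int.sub_zero, Int.zero_add] at this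
  simp only [PySem.List.len_eq]
  rw [this]

-- B's loop invariant: the list's prefix holds the filter of x[:i], cursor = its length
lemma pvB_loop (x : List Int) : ∀ (n i : Nat), i + n = x.length →
    (PySem.List.pyRange (i : Int) (x.length : Int) 1).foldl (pvStepB x)
      ((x.take i).filter pvKeep ++ x.drop ((x.take i).filter pvKeep).length,
       (((x.take i).filter pvKeep).length : Int))
    = (x.filter pvKeep ++ x.drop (x.filter pvKeep).length,
       ((x.filter pvKeep).length : Int)) := by
  intro n
  induction n with
  | zero =>
    intro i hi
    have : i = x.length := by omega
    subst this
    rw [PySem.List.pyRange_one_eq_nil (by simp)]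
    simp
  | succ n ih =>
    intro i hi
    have hlt : i < x.length := by omega
    rw [PySem.List.pyRange_one_cons (by exact_mod_cast hlt), List.foldl_cons]
    have hw_le : ((x.take i).filter pvKeep).length ≤ i :=
      le_trans (List.length_filter_le _ _) (by simp)
    have hw_lt : ((x.take i).filter pvKeep).length < x.length := lt_of_le_of_lt hw_le hlt
    have hdrop : x.drop ((x.take i).filter pvKeep).length
        = x[((x.take i).filter pvKeep).length] :: x.drop (((x.take i).filter pvKeep).length + 1) :=
      List.drop_eq_getElem_cons hw_lt
    have hget : PySem.List.pyGetD x (i : Int) 0 = x[i] := by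
      rw [PySem.List.pyGetD_natCast]
      exact List.getD_eq_getElem x 0 hlt
    have htake : x.take (i + 1) = x.take i ++ [x[i]] := by
      rw [List.take_add_one]; simp [List.getElem?_eq_getElem hlt]
    by_cases hk : pvKeep x[i]
    · -- written at the cursor
      have hstep : pvStepB x ((x.take i).filter pvKeep ++ x.drop ((x.take i).filter pvKeep).length,
            (((x.take i).filter pvKeep).length : Int)) (i : Int)
          = ((x.take (i+1)).filter pvKeep ++ x.drop ((x.take (i+1)).filter pvKeep).length,
             (((x.take (i+1)).filter pvKeep).length : Int)) := by
        unfold pvStepB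
        simp only [hget]
        rw [if_pos (show (PySem.Int.mod x[i] 2 != 0 || x[i] == 0) = true from hk)]
        rw [PySem.List.pySetD_natCast, hdrop, pvSet_append]
        rw [htake, List.filter_append, List.filter_cons_of_pos hk]
        simp only [List.filter_nil, List.append_assoc, List.cons_append, List.nil_append,
          List.length_append, List.length_cons, List.length_nil]
        push_cast
        ring_nf
      rw [hstep]
      exact ih (i + 1) (by omega)
    · -- skipped
      have hstep : pvStepB x ((x.take i).filter pvKeep ++ x.drop ((x.take i).filter pvKeep).length,
            (((x.take i).filter pvKeep).length : Int)) (i : Int)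
          = ((x.take (i+1)).filter pvKeep ++ x.drop ((x.take (i+1)).filter pvKeep).length,
             (((x.take (i+1)).filter pvKeep).length : Int)) := by
        unfold pvStepB
        simp only [hget]
        rw [if_neg (show ¬ (PySem.Int.mod x[i] 2 != 0 || x[i] == 0) = true from by simpa [pvKeep] using hk)]
        rw [htake, List.filter_append, List.filter_cons_of_neg (by simpa using hk)]
        simp
      rw [hstep]
      exact ih (i + 1) (by omega)

lemma pvB_eq_filter (x : List Int) : removeEvens_alt x = x.filter pvKeep := by
  unfold removeEvens_alt
  have := pvB_loop x x.length 0 (by omega)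
  simp only [List.take_zero, List.filter_nil, List.length_nil, Nat.cast_zero, List.nil_append,
    List.drop_zero] at this
  simp only [PySem.List.len_eq]
  rw [this]
  rw [PySem.List.slice_to_natCast]
  exact List.take_left

-- ===== VERDICT (by name: the statement is the Claim_ definition above) =====
theorem removeEvens_spec : Claim_equal_removeEvens := by
  intro x _
  unfold Spec_removeEvens
  rw [pvA_eq_filter, pvB_eq_filter]
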